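-- pv_equiv track=rewrite | github.com/tstirrat/wow-threat | .agents/skills/take-task/scripts/todo_task.py | update_task_index_status
-- ===== SOURCE A (Python) =====
-- def update_task_index_status(text: str, task_id: str, status: str) -> str:
--   lines = text.splitlines(keepends=True)
--   in_open_index = False
--
--   for idx, line in enumerate(lines):
--     if line.startswith('## Task Index (Open)'):
--       in_open_index = True
--       continue
--
--     if in_open_index and line.startswith('## ') and not line.startswith('## Task Index (Open)'):
--       break
--
--     if not in_open_index or not line.lstrip().startswith('|'):
--       continue
--
--     cells = line.split('|')
--     if len(cells) < 8:
--       continue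
--
--     row_id = cells[1].strip()
--     if row_id != task_id:
--       continue
--
--     cells[3] = f' {status:<11} '
--     lines[idx] = '|'.join(cells)
--     break
--
--   return ''.join(lines)
-- ===== SOURCE B (Python) =====
-- def _find_header(lines):
--     for i, ln in enumerate(lines):
--         if ln.startswith('## Task Index (Open)'):
--             return i
--     return None
--
--
-- def _section_len(lines):
--     n = 0
--     for ln in lines:
--         if ln.startswith('## ') and not ln.startswith('## Task Index (Open)'):
--             break
--         n += 1
--     return n
--
--
-- def _fix_first(lines, task_id, status):
--     for j, ln in enumerate(lines):
--         cells = ln.split('|')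
--         if ln.lstrip().startswith('|') and len(cells) >= 8 and cells[1].strip() == task_id:
--             cells[3] = f' {status:<11} '
--             return lines[:j] + ['|'.join(cells)] + lines[j + 1:]
--     return lines
--
--
-- def update_task_index_status(text: str, task_id: str, status: str) -> str:
--     lines = text.splitlines(keepends=True)
--     h = _find_header(lines)
--     if h is None:
--         return text
--     k = _section_len(lines[h + 1:])
--     window = _fix_first(lines[h + 1:h + 1 + k], task_id, status)
--     return ''.join(lines[:h + 1] + window + lines[h + 1 + k:])
-- ===== Notes on version B (the rewrite author's own statement) =====
-- stated objective: simpler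
-- what changed: A's single stateful scan (in_open_index flag with continue/break and in-place mutation) is split into three phases: find the '## Task Index (Open)' header line, measure the section window up to the next '## ' line, and rewrite the first matching row inside that window only.
import Mathlib
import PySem

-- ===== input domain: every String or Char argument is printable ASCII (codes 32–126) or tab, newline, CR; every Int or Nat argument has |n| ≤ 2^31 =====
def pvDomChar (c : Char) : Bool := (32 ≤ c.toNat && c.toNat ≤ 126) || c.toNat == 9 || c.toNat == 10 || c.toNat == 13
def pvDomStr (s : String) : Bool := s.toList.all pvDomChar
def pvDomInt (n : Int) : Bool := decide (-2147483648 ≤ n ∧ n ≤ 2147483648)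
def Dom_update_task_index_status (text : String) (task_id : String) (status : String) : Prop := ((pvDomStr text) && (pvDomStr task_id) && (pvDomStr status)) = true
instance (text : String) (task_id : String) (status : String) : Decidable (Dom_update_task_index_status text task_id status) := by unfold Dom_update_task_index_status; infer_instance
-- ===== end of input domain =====

-- B re-decomposes A's single stateful scan into three phases (find header, measure
-- section window, rewrite first matching row inside the window); objective: simpler
-- decomposition, same cost.

-- ===== PORT A =====
-- shared literal constants: the two header prefixes both programs test with startswith
def pvHdr : List Char := "## Task Index (Open)".toList
def pvHash : List Char := "## ".toList

-- shared helper: text.splitlines(keepends=True), hand-ported (PySem has no keepends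
-- variant); exact on the ASCII domain, where the line breaks are '\n', '\r', '\r\n'.
def pvTakeLine : List Char → List Char × List Char
  | [] => ([], [])
  | c :: rest =>
    if c = '\n' then ([c], rest)
    else if c = '\r' then
      match rest with
      | '\n' :: rest' => ([c, '\n'], rest')
      | _ => ([c], rest)
    else
      let p := pvTakeLine rest
      (c :: p.1, p.2)

theorem pvTakeLine_snd_lt : ∀ (cs : List Char), cs ≠ [] → (pvTakeLine cs).2.length < cs.length := by
  intro cs
  induction cs with
  | nil => simp
  | cons c rest ih =>
    intro _
    simp only [pvTakeLine]
    split_ifs with h1 h2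
    · simp
    · cases rest with
      | nil => simp
      | cons d r =>
        by_cases hd : d = '\n'
        · subst hd; simp
        · have : (match d :: r with
              | '\n' :: rest' => ([c, '\n'], rest')
              | _ => ([c], d :: r)) = (([c], d :: r) : List Char × List Char) := by
            simp [hd]
          rw [this]; simp
    · cases rest with
      | nil => simp [pvTakeLine]
      | cons d r =>
        have h := ih (by simp)
        simp only [List.length_cons] at h ⊢
        omega

def pvSplitLinesKeep : List Char → List (List Char)
  | [] => []
  | c :: rest =>
    (pvTakeLine (c :: rest)).1 :: pvSplitLinesKeep (pvTakeLine (c :: rest)).2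
termination_by cs => cs.length
decreasing_by exact pvTakeLine_snd_lt _ (by simp)

-- shared helper: the replacement cell f' {status:<11} '
def pvStatusCell (status : List Char) : List Char :=
  (' ' :: (status ++ List.replicate (11 - status.length) ' ')) ++ [' ']

-- A's single loop: flag in_open_index, continue/break, first match rewritten in place.
def pvALoop (task_id status : List Char) : List (List Char) → Bool → List (List Char)
  | [], _ => []
  | line :: rest, inOpen =>
    if PySem.Chars.startswith line pvHdr then
      line :: pvALoop task_id status rest true
    else if inOpen && PySem.Chars.startswith line pvHash
        && !(PySem.Chars.startswith line pvHdr) then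
      line :: rest
    else if !inOpen || !(PySem.Chars.startswith (PySem.Chars.lstrip line) ['|']) then
      line :: pvALoop task_id status rest inOpen
    else
      let cells := PySem.Chars.splitOn line ['|']
      if cells.length < 8 then line :: pvALoop task_id status rest inOpen
      else if !(PySem.Chars.strip (cells.getD 1 []) == task_id) then
        line :: pvALoop task_id status rest inOpen
      else
        (PySem.Chars.join ['|'] (cells.set 3 (pvStatusCell status))) :: rest

def update_task_index_status (text : String) (task_id : String) (status : String) : String :=
  String.ofList (PySem.Chars.join []
    (pvALoop task_id.toList status.toList (pvSplitLinesKeep text.toList) false))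

-- ===== PORT B =====
def pvHeaderB (l : List Char) : Bool :=
  PySem.Chars.startswith l pvHdr

-- _find_header
def pvFindHeader : List (List Char) → Option Nat
  | [] => none
  | l :: rest => if pvHeaderB l then some 0 else (pvFindHeader rest).map (· + 1)

-- _section_len
def pvSectionLen : List (List Char) → Nat
  | [] => 0
  | l :: rest =>
    if PySem.Chars.startswith l pvHash && !pvHeaderB l then 0
    else pvSectionLen rest + 1

-- _fix_first
def pvFixFirst (task_id status : List Char) : List (List Char) → List (List Char)
  | [] => []
  | l :: rest =>
    let cells := PySem.Chars.splitOn l ['|']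
    if PySem.Chars.startswith (PySem.Chars.lstrip l) ['|'] && decide (8 ≤ cells.length)
        && (PySem.Chars.strip (cells.getD 1 []) == task_id) then
      (PySem.Chars.join ['|'] (cells.set 3 (pvStatusCell status))) :: rest
    else l :: pvFixFirst task_id status rest

def update_task_index_status_alt (text : String) (task_id : String) (status : String) : String :=
  match pvFindHeader (pvSplitLinesKeep text.toList) with
  | none => text
  | some h =>
    String.ofList (PySem.Chars.join []
      ((pvSplitLinesKeep text.toList).take (h + 1)
        ++ pvFixFirst task_id.toList status.toList
            (((pvSplitLinesKeep text.toList).drop (h + 1)).take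
              (pvSectionLen ((pvSplitLinesKeep text.toList).drop (h + 1))))
        ++ (pvSplitLinesKeep text.toList).drop
            (h + 1 + pvSectionLen ((pvSplitLinesKeep text.toList).drop (h + 1)))))

-- ===== PRECONDITION & SPEC =====
def Spec_update_task_index_status (text : String) (task_id : String) (status : String) (out : String) : Prop := out = update_task_index_status_alt text task_id status
instance (text : String) (task_id : String) (status : String) (out : String) : Decidable (Spec_update_task_index_status text task_id status out) := by unfold Spec_update_task_index_status; infer_instance

-- ===== CLAIM (what is proved, stated in full; the proofs are below) =====
def Claim_equal_update_task_index_status : Prop := ∀ (text : String) (task_id : String) (status : String), Dom_update_task_index_status text task_id status → Spec_update_task_index_status text task_id status (update_task_index_status text task_id status)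

-- ===== LEMMAS AND PROOFS =====
theorem pvTakeLine_append (cs : List Char) : (pvTakeLine cs).1 ++ (pvTakeLine cs).2 = cs := by
  induction cs with
  | nil => simp [pvTakeLine]
  | cons c rest ih =>
    simp only [pvTakeLine]
    split_ifs with h1 h2
    · simp [h1]
    · cases rest with
      | nil => simp [h2]
      | cons d r =>
        by_cases hd : d = '\n'
        · subst hd; simp [h2]
        · have : (match d :: r with
              | '\n' :: rest' => ([c, '\n'], rest')
              | _ => ([c], d :: r)) = (([c], d :: r) : List Char × List Char) := by
            simp [hd]
          rw [this]; simp
    · simpa using ih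

theorem pvJoin_nil_cons (x : List Char) (t : List (List Char)) :
    PySem.Chars.join [] (x :: t) = x ++ PySem.Chars.join [] t := by
  cases t with
  | nil => simp [PySem.Chars.join_singleton, PySem.Chars.join_nil]
  | cons y r => rw [PySem.Chars.join_cons_cons]; simp

theorem pvJoinSplit : ∀ (cs : List Char), PySem.Chars.join [] (pvSplitLinesKeep cs) = cs := by
  intro cs
  induction cs using pvSplitLinesKeep.induct with
  | case1 => simp [pvSplitLinesKeep, PySem.Chars.join_nil]
  | case2 c rest ih =>
    rw [pvSplitLinesKeep, pvJoin_nil_cons, ih, pvTakeLine_append]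

theorem pvHash_no_pipe (l : List Char)
    (h : PySem.Chars.startswith l pvHash = true) :
    PySem.Chars.startswith (PySem.Chars.lstrip l) ['|'] = false := by
  rw [PySem.Chars.startswith_iff] at h
  obtain ⟨t, rfl⟩ := h
  simp [PySem.Chars.lstrip, PySem.Chars.startswith, PySem.Chars.isspace,
    List.isPrefixOf, pvHash]

theorem pvHeader_hash (l : List Char)
    (h : PySem.Chars.startswith l pvHdr = true) :
    PySem.Chars.startswith l pvHash = true := by
  rw [PySem.Chars.startswith_iff] at h ⊢
  obtain ⟨t, rfl⟩ := h
  exact ⟨("Task Index (Open)".toList) ++ t, by simp [pvHdr, pvHash]⟩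

theorem pvALoop_true (tid st : List Char) : ∀ rest,
    pvALoop tid st rest true =
      pvFixFirst tid st (rest.take (pvSectionLen rest)) ++ rest.drop (pvSectionLen rest) := by
  intro rest
  induction rest with
  | nil => simp [pvALoop, pvFixFirst, pvSectionLen]
  | cons l r ih =>
    by_cases hh : PySem.Chars.startswith l pvHdr = true
    · have hpipe := pvHash_no_pipe l (pvHeader_hash l hh)
      simp [pvALoop, pvFixFirst, pvSectionLen, pvHeaderB, hh, hpipe, ih]
    · by_cases hb : PySem.Chars.startswith l pvHash = true
      · simp [pvALoop, pvFixFirst, pvSectionLen, pvHeaderB, hh, hb]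
      · by_cases hp : PySem.Chars.startswith (PySem.Chars.lstrip l) ['|'] = true
        · by_cases hlen : (PySem.Chars.splitOn l ['|']).length < 8
          · have h8 : ¬ (8 ≤ (PySem.Chars.splitOn l ['|']).length) := by omega
            simp [pvALoop, pvFixFirst, pvSectionLen, pvHeaderB, hh, hb, hp, hlen, h8, ih]
          · have h8 : 8 ≤ (PySem.Chars.splitOn l ['|']).length := by omega
            by_cases hid : PySem.Chars.strip ((PySem.Chars.splitOn l ['|'])[1]?.getD []) = tid
            · simp [pvALoop, pvFixFirst, pvSectionLen, pvHeaderB, hh, hb, hp, hlen, h8, hid,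
                List.take_append_drop]
            · simp [pvALoop, pvFixFirst, pvSectionLen, pvHeaderB, hh, hb, hp, hlen, h8, hid, ih]
        · simp [pvALoop, pvFixFirst, pvSectionLen, pvHeaderB, hh, hb, hp, ih]

theorem pvALoop_false_none (tid st : List Char) : ∀ lines,
    pvFindHeader lines = none → pvALoop tid st lines false = lines := by
  intro lines
  induction lines with
  | nil => simp [pvALoop]
  | cons l r ih =>
    intro hf
    cases hh : pvHeaderB l with
    | true => rw [pvFindHeader, if_pos hh] at hf; simp at hf
    | false =>
      rw [pvFindHeader, if_neg (by simp [hh])] at hf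
      have hr : pvFindHeader r = none := by
        cases h : pvFindHeader r with
        | none => rfl
        | some v => rw [h] at hf; simp at hf
      have hh' : ¬ (PySem.Chars.startswith l pvHdr = true) := by
        simpa [pvHeaderB] using hh
      simp [pvALoop, hh', ih hr]

theorem pvALoop_false_some (tid st : List Char) : ∀ lines h,
    pvFindHeader lines = some h →
    pvALoop tid st lines false =
      lines.take (h + 1) ++ pvALoop tid st (lines.drop (h + 1)) true := by
  intro lines
  induction lines with
  | nil => intro h hf; simp [pvFindHeader] at hf
  | cons l r ih =>
    intro h hf
    cases hh : pvHeaderB l with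
    | true =>
      rw [pvFindHeader, if_pos hh] at hf
      obtain rfl : h = 0 := by simpa using hf.symm
      have hh' : PySem.Chars.startswith l pvHdr = true := by simpa [pvHeaderB] using hh
      simp [pvALoop, hh']
    | false =>
      rw [pvFindHeader, if_neg (by simp [hh])] at hf
      cases hr : pvFindHeader r with
      | none => rw [hr] at hf; simp at hf
      | some g =>
        rw [hr] at hf
        obtain rfl : h = g + 1 := by simpa using hf.symm
        have hh' : ¬ (PySem.Chars.startswith l pvHdr = true) := by
          simpa [pvHeaderB] using hh
        simp only [pvALoop, List.take_succ_cons, List.drop_succ_cons]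
        rw [if_neg hh', if_neg (by simp), if_pos (by simp), ih g hr]
        simp

-- ===== VERDICT (by name: the statement is the Claim_ definition above) =====
theorem update_task_index_status_spec : Claim_equal_update_task_index_status := by
  unfold Claim_equal_update_task_index_status
  intro text tid st _
  unfold Spec_update_task_index_status update_task_index_status update_task_index_status_alt
  cases hf : pvFindHeader (pvSplitLinesKeep text.toList) with
  | none =>
    rw [pvALoop_false_none _ _ _ hf, pvJoinSplit, String.ofList_toList]
  | some h =>
    rw [pvALoop_false_some _ _ _ _ hf, pvALoop_true, List.drop_drop, ← List.append_assoc]
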